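-- pv_equiv track=rewrite | github.com/pradeep1109/FitCodeChallenge | lc-914-x-of-a-kind-in-deck.py | my_soln
-- ===== SOURCE A (Python) =====
-- import math
--
-- def my_soln (deck):
--     hash_map = {}
--     for i in deck:
--         hash_map[i] = 1+hash_map.get(i,0)
--
--     cur_gcd = 0
--
--     for count in hash_map.values ():
--         cur_gcd = math.gcd(count,cur_gcd)
--
--     return cur_gcd > 1
-- ===== SOURCE B (Python) =====
-- def my_soln(deck):
--     # Trial-divisor search over candidate equal-group sizes instead of folding gcd.
--     counts = {}
--     for c in deck:
--         counts[c] = counts.get(c, 0) + 1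
--     vals = list(counts.values())
--     if not vals:
--         return False
--     m = min(vals)
--     for d in range(2, m + 1):
--         if all(v % d == 0 for v in vals):
--             return True
--     return False
-- ===== Notes on version B (the rewrite author's own statement) =====
-- stated objective: alternative
-- what changed: After counting occurrences, B replaces A's gcd-fold over the count values with an explicit trial-divisor search: it tries each candidate group size d from 2 up to the minimum count and returns True as soon as every count is divisible by d.
import Mathlib
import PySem

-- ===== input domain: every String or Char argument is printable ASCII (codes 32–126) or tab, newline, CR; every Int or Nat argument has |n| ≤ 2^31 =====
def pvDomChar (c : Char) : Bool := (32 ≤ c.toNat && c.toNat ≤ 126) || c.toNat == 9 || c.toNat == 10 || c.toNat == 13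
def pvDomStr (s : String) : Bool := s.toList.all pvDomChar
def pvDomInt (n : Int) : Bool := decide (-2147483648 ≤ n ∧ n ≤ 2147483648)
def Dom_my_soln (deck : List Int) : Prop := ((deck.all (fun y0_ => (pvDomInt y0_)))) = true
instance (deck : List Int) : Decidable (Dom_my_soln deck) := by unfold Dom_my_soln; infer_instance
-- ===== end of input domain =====

-- B replaces A's gcd fold over the counts by a trial-divisor search over group sizes 2..min(count): an alternative algorithm, same exact result.

-- ===== PORT A =====
def my_soln (deck : List Int) : Bool :=
  let hash_map := deck.foldl (fun d i => d.insert i (1 + d.getD i 0)) PySem.Dict.empty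
  let cur_gcd := hash_map.values.foldl (fun g c => ((Int.gcd c g : Nat) : Int)) 0
  decide (cur_gcd > 1)

-- ===== PORT B =====
def my_soln_alt (deck : List Int) : Bool :=
  let counts := deck.foldl (fun d c => d.insert c (d.getD c 0 + 1)) PySem.Dict.empty
  let vals : List Int := counts.values
  match PySem.List.min? vals (fun v => v) with
  | none => false          -- `if not vals: return False`
  | some m =>
    (PySem.List.pyRange 2 (m + 1) 1).any (fun d =>
      vals.all (fun v => PySem.Int.mod v d == 0))

-- ===== PRECONDITION & SPEC =====
def Spec_my_soln (deck : List Int) (out : Bool) : Prop := out = my_soln_alt deck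
instance (deck : List Int) (out : Bool) : Decidable (Spec_my_soln deck out) := by unfold Spec_my_soln; infer_instance

-- ===== CLAIM (what is proved, stated in full; the proofs are below) =====
def Claim_equal_my_soln : Prop := ∀ (deck : List Int), Dom_my_soln deck → Spec_my_soln deck (my_soln deck)

-- ===== LEMMAS AND PROOFS =====

-- A's dict is exactly Counter(deck)
theorem hm_eq_counter (deck : List Int) :
    deck.foldl (fun d i => d.insert i (1 + d.getD i 0)) PySem.Dict.empty = PySem.Dict.counter deck := by
  have hf : (fun (d : PySem.Dict Int Int) i => d.insert i (1 + d.getD i 0))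
      = (fun (d : PySem.Dict Int Int) x => d.insert x (d.getD x 0 + 1)) := by
    funext d i; rw [Int.add_comm]
  rw [hf, PySem.Dict.foldl_insert_getD_add_one_eq_counter]

-- the values of Counter(deck) are exactly B's list of counts
theorem values_counter_eq (deck : List Int) :
    (PySem.Dict.counter deck).values
      = (PySem.Set.ofList deck).map (fun x => (PySem.List.count deck x : Int)) := by
  simp [PySem.Dict.values, PySem.Dict.items_counter, PySem.List.count]

-- the gcd fold divides every element of the list and the seed
theorem foldG_dvd (l : List Int) : ∀ (a : Int),
    (∀ v ∈ l, l.foldl (fun g c => ((Int.gcd c g : Nat) : Int)) a ∣ v)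
      ∧ l.foldl (fun g c => ((Int.gcd c g : Nat) : Int)) a ∣ a := by
  induction l with
  | nil => intro a; exact ⟨by simp, dvd_refl a⟩
  | cons x t ih =>
    intro a
    obtain ⟨h1, h2⟩ := ih ((Int.gcd x a : Nat) : Int)
    refine ⟨?_, h2.trans (Int.gcd_dvd_right x a)⟩
    intro v hv
    rcases List.mem_cons.1 hv with rfl | hv
    · exact h2.trans (Int.gcd_dvd_left v a)
    · exact h1 v hv

-- any common divisor of the list and the seed divides the gcd fold
theorem dvd_foldG (l : List Int) : ∀ (a d : Int),
    (∀ v ∈ l, d ∣ v) → d ∣ a → d ∣ l.foldl (fun g c => ((Int.gcd c g : Nat) : Int)) a := by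
  induction l with
  | nil => intro a d _ h; simpa using h
  | cons x t ih =>
    intro a d hl ha
    refine ih _ d (fun v hv => hl v (List.mem_cons_of_mem _ hv)) ?_
    have hx : (d.natAbs : Int) ∣ x := (Int.natAbs_dvd).2 (hl x (List.mem_cons_self))
    have ha' : (d.natAbs : Int) ∣ a := (Int.natAbs_dvd).2 ha
    have := Int.dvd_gcd hx ha'
    exact (Int.natAbs_dvd).1 (Int.natCast_dvd_natCast.2 this)

-- the gcd fold from seed 0 is nonnegative
theorem foldG_nonneg (l : List Int) :
    0 ≤ l.foldl (fun g c => ((Int.gcd c g : Nat) : Int)) 0 := by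
  cases l with
  | nil => simp
  | cons x t =>
    have : ∀ (t : List Int) (a : Nat), 0 ≤ t.foldl (fun g c => ((Int.gcd c g : Nat) : Int)) (a : Int) := by
      intro t
      induction t with
      | nil => intro a; simp
      | cons y s ih =>
        intro a
        simpa using ih (Int.gcd y a)
    simpa using this t (Int.gcd x 0)

-- every count in B's list is at least 1
theorem vals_pos (deck : List Int) :
    ∀ v ∈ (PySem.Set.ofList deck).map (fun x => (PySem.List.count deck x : Int)), 1 ≤ v := by
  intro v hv
  obtain ⟨x, hx, rfl⟩ := List.mem_map.1 hv
  have hxd : x ∈ deck := (PySem.Set.mem_ofList deck x).1 hx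
  have : 1 ≤ PySem.List.count deck x := by
    simpa [PySem.List.count, List.count_pos_iff] using hxd
  exact_mod_cast this

-- ===== VERDICT (by name: the statement is the Claim_ definition above) =====
theorem my_soln_spec : Claim_equal_my_soln := by
  intro deck _
  unfold Spec_my_soln my_soln my_soln_alt
  simp only [hm_eq_counter, PySem.Dict.foldl_insert_getD_add_one_eq_counter, values_counter_eq]
  set vals := (PySem.Set.ofList deck).map (fun x => (PySem.List.count deck x : Int)) with hvals
  set g := vals.foldl (fun g c => ((Int.gcd c g : Nat) : Int)) 0 with hg
  cases hmin : PySem.List.min? vals (fun v => v) with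
  | none =>
    -- vals = [], so the gcd fold is 0
    have : vals = [] := (PySem.List.min?_eq_none_iff vals _).1 hmin
    simp [hg, this]
  | some m =>
    have hmem : m ∈ vals := PySem.List.min?_mem hmin
    have hpos := vals_pos deck
    rw [← hvals] at hpos
    have hgdvd := (foldG_dvd vals 0).1
    rw [← hg] at hgdvd
    have hgnn : 0 ≤ g := foldG_nonneg vals
    rw [Bool.eq_iff_iff]
    simp only [decide_eq_true_eq, List.any_eq_true, List.all_eq_true, beq_iff_eq]
    constructor
    · -- g > 1 → the search finds d = g
      intro hgt
      refine ⟨g, ?_, ?_⟩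
      · rw [PySem.List.mem_pyRange_one]
        have : g ≤ m := Int.le_of_dvd (by linarith [hpos m hmem]) (hgdvd m hmem)
        constructor <;> omega
      · intro v hv
        exact (PySem.Int.mod_eq_zero_iff_dvd v g).2 (hgdvd v hv)
    · -- a successful divisor d forces g ≥ d ≥ 2
      rintro ⟨d, hdr, hall⟩
      rw [PySem.List.mem_pyRange_one] at hdr
      have hddvd : d ∣ g := by
        refine dvd_foldG vals 0 d ?_ (dvd_zero d)
        intro v hv
        exact (PySem.Int.mod_eq_zero_iff_dvd v d).1 (hall v hv)
      have hgne : g ≠ 0 := by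
        intro h0
        have := hgdvd m hmem
        rw [h0] at this
        have := zero_dvd_iff.1 this
        have := hpos m hmem
        omega
      have : d ≤ g := Int.le_of_dvd (by omega) hddvd
      omega
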